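-- pv_equiv track=rewrite | github.com/vrbart/Q-Base-by-MVS-Final | src/ccbs_app/ai3/evolution.py | stage_index_from_xp
-- ===== SOURCE A (Python) =====
-- from typing import Any
--
-- STAGES: list[dict[str, Any]] = [
--     {
--         "index": 0,
--         "name": "scribble_1",
--         "label": "Scribble I",
--         "min_xp": 0,
--         "variant_rank": 0,
--         "aliases": ["l0", "s0", "scribble_1", "scribble1", "sketch", "sketch_1", "stage0"],
--     },
--     {
--         "index": 1,
--         "name": "scribble_2",
--         "label": "Scribble II",
--         "min_xp": 2,
--         "variant_rank": 0,
--         "aliases": ["l1", "s1", "scribble_2", "scribble2", "sketch_2", "stage1"],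
--     },
--     {
--         "index": 2,
--         "name": "base",
--         "label": "Base",
--         "min_xp": 5,
--         "variant_rank": 1,
--         "aliases": ["l2", "s2", "a", "base", "stage2"],
--     },
--     {
--         "index": 3,
--         "name": "evolved",
--         "label": "Evolved",
--         "min_xp": 12,
--         "variant_rank": 2,
--         "aliases": ["l3", "s3", "b", "evolved", "stage3"],
--     },
--     {
--         "index": 4,
--         "name": "elite",
--         "label": "Elite",
--         "min_xp": 24,
--         "variant_rank": 3,
--         "aliases": ["l4", "s4", "c", "elite", "stage4"],
--     },
--     {
--         "index": 5,
--         "name": "rare",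
--         "label": "Rare",
--         "min_xp": 40,
--         "variant_rank": 4,
--         "aliases": ["l5", "s5", "d", "rare", "stage5"],
--     },
--     {
--         "index": 6,
--         "name": "mythic",
--         "label": "Mythic",
--         "min_xp": 65,
--         "variant_rank": 5,
--         "aliases": ["l6", "s6", "e", "mythic", "legend", "stage6"],
--     },
-- ]
--
-- def stage_index_from_xp(xp: int) -> int:
--     value = max(0, int(xp))
--     selected = 0
--     for stage in STAGES:
--         if value >= int(stage["min_xp"]):
--             selected = int(stage["index"])
--         else:
--             break
--     return selected
-- ===== SOURCE B (Python) =====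
-- import bisect
--
-- _THRESHOLDS = [0, 2, 5, 12, 24, 40, 65]
--
-- def stage_index_from_xp(xp: int) -> int:
--     value = max(0, int(xp))
--     return bisect.bisect_right(_THRESHOLDS, value) - 1
-- ===== Notes on version B (the rewrite author's own statement) =====
-- stated objective: idiomatic
-- what changed: Replaces the linear scan over STAGES (with early break and selected accumulator) by a binary search: bisect_right on the ascending min_xp thresholds, minus one.
import Mathlib
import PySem

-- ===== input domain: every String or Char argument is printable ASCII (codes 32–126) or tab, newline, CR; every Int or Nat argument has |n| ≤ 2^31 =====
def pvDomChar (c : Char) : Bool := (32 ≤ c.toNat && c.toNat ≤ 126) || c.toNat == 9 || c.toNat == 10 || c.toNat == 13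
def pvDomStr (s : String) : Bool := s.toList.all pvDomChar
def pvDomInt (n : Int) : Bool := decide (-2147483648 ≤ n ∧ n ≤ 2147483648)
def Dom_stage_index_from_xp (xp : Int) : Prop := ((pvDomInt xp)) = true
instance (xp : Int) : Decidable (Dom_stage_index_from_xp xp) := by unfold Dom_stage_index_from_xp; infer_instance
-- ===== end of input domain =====

-- B replaces A's linear scan with early break by bisect_right on the min_xp thresholds (idiomatic).
-- ===== PORT A =====
-- STAGES reduced to the fields the function reads: (min_xp, index) per stage, in order
def pvStagesA : List (Int × Int) :=
  [(0, 0), (2, 1), (5, 2), (12, 3), (24, 4), (40, 5), (65, 6)]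

-- the for-loop with its break: recurse over the stage list carrying `selected`
def pvLoopA (value : Int) : List (Int × Int) → Int → Int
  | [], selected => selected
  | (mn, idx) :: rest, selected =>
      if value ≥ mn then pvLoopA value rest idx else selected

def stage_index_from_xp (xp : Int) : Int :=
  pvLoopA (max 0 xp) pvStagesA 0

-- ===== PORT B =====
def pvThresholds : List Int := [0, 2, 5, 12, 24, 40, 65]

-- bisect.bisect_right: binary search, fueled by the list length
def pvBisectRight (fuel : Nat) (a : List Int) (x : Int) (lo hi : Nat) : Nat :=
  match fuel with
  | 0 => lo
  | fuel + 1 =>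
      if lo < hi then
        let mid := (lo + hi) / 2
        if x < a.getD mid 0 then pvBisectRight fuel a x lo mid
        else pvBisectRight fuel a x (mid + 1) hi
      else lo

def stage_index_from_xp_alt (xp : Int) : Int :=
  (pvBisectRight pvThresholds.length pvThresholds (max 0 xp) 0 pvThresholds.length : Int) - 1

-- ===== PRECONDITION & SPEC =====
def Spec_stage_index_from_xp (xp : Int) (out : Int) : Prop := out = stage_index_from_xp_alt xp
instance (xp : Int) (out : Int) : Decidable (Spec_stage_index_from_xp xp out) := by unfold Spec_stage_index_from_xp; infer_instance

-- ===== CLAIM (what is proved, stated in full; the proofs are below) =====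
def Claim_equal_stage_index_from_xp : Prop := ∀ (xp : Int), Dom_stage_index_from_xp xp → Spec_stage_index_from_xp xp (stage_index_from_xp xp)

-- ===== LEMMAS AND PROOFS =====

-- ===== VERDICT (by name: the statement is the Claim_ definition above) =====
theorem stage_index_from_xp_spec : Claim_equal_stage_index_from_xp := by
  intro xp _
  unfold Spec_stage_index_from_xp stage_index_from_xp stage_index_from_xp_alt
  simp only [pvStagesA, pvThresholds, pvLoopA, pvBisectRight, List.length, List.getD,
    List.getElem?_cons_zero, List.getElem?_cons_succ]
  norm_num
  split_ifs <;> omega
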